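-- pv_equiv track=rewrite | github.com/b-it-bots/mas_domestic_robotics | mdr_behaviors/mdr_tactile_grasp/common/src/mdr_tactile_grasp_common/tactile_data_computation.py | get_pressure_regions
-- ===== SOURCE A (Python) =====
-- def get_pressure_regions(pressures, regions):
--     """
--     Obtains the pressure values of each contact region as a dictionary, where the
--     keys represent the labels of the contact regions and the values the pressures
--     in each cell (tactel).
--     It only calculates one phalanx (i.e. one tactile matrix).
--
--     Args:
--         pressures: Int[]
--             The contact values (in scaled pressure units, i.e. 4095 is the
--             maximum) in each cell for a single tactile matrix.
--         regions: Int[[]]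
--             The labels of the contact regions for a single tactile matrix
--
--     Returns:
--         pressure_regions: Float{}
--             The labels of the contact regions (keys) with their contact values
--             for a single tactile matrix.
--
--     """
--     pressure_regions = {}
--
--     for i, region in enumerate(regions):
--         if region > 0:
--             try:
--                 if pressure_regions[region]:
--                     pressure_regions[region].append(pressures[i])
--             except KeyError:
--                 pressure_regions[region] = [pressures[i]]
--
--     return pressure_regions
-- ===== SOURCE B (Python) =====
-- def get_pressure_regions(pressures, regions):
--     seen = []
--     for r in regions:
--         if r > 0 and r not in seen:
--             seen.append(r)
--     return {lab: [pressures[i] for i, r in enumerate(regions) if r == lab]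
--             for lab in seen}
-- ===== Notes on version B (the rewrite author's own statement) =====
-- stated objective: alternative
-- what changed: Instead of one dict-mutating pass that looks each label up and catches KeyError to create-or-append, B first computes the distinct positive labels in first-occurrence order and then builds the dict with one full comprehension scan per label collecting that label's pressures; the dict is never mutated and no per-element lookup/exception happens.
import Mathlib
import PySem

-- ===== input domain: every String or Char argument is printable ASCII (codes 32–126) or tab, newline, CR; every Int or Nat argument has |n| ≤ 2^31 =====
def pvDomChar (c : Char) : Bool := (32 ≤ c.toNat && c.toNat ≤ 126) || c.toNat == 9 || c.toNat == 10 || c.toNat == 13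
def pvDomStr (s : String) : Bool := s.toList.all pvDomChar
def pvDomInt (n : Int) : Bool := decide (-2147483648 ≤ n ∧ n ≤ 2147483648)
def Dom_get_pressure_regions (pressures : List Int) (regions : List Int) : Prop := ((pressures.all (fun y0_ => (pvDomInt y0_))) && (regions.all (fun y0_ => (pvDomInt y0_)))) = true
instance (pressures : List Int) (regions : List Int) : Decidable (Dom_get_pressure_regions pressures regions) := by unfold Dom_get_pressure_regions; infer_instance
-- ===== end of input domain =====

-- B replaces A's single dict-mutating pass (lookup, truthiness test, except KeyError to
-- create-or-append) by staged passes: first collect the distinct positive labels in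
-- first-occurrence order, then build the result with one comprehension scan per label
-- gathering that label's pressure values (objective: alternative).

-- ===== PORT A =====
def get_pressure_regions (pressures : List Int) (regions : List Int) : List (Int × List Int) :=
  ((PySem.List.enumerate regions 0).foldl (fun (d : PySem.Dict Int (List Int)) (p : Int × Int) =>
      if p.2 > 0 then
        match PySem.Dict.get? d p.2 with
        | some l =>
            -- 'if pressure_regions[region]:' — truthiness of the stored list
            if l ≠ [] then PySem.Dict.insert d p.2 (l ++ [PySem.List.pyGetD pressures p.1 0]) else d
        | none => PySem.Dict.insert d p.2 [PySem.List.pyGetD pressures p.1 0]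
      else d)
    PySem.Dict.empty).items

-- ===== PORT B =====
def get_pressure_regions_alt (pressures : List Int) (regions : List Int) : List (Int × List Int) :=
  -- pass 1: distinct positive labels in first-occurrence order ('seen')
  let seen := regions.foldl
    (fun (acc : List Int) (r : Int) => if r > 0 ∧ ¬ r ∈ acc then acc ++ [r] else acc) []
  -- pass 2: dict comprehension, one comprehension scan per label
  seen.map (fun lab =>
    (lab, (PySem.List.enumerate regions 0).filterMap
      (fun p => if p.2 = lab then some (PySem.List.pyGetD pressures p.1 0) else none)))

-- ===== PRECONDITION & SPEC =====
-- Pre_ excludes exactly the inputs on which Python A raises IndexError: some index i with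
-- regions[i] > 0 but i out of range for pressures (pressures[i] is only evaluated there).
def Pre_get_pressure_regions (pressures : List Int) (regions : List Int) : Prop :=
  ∀ i : Nat, (h : i < regions.length) → regions[i] > 0 → i < pressures.length
instance (pressures : List Int) (regions : List Int) : Decidable (Pre_get_pressure_regions pressures regions) := by unfold Pre_get_pressure_regions; infer_instance
def pvWitness_get_pressure_regions : List Int × List Int := ([5, 10, 0], [1, 2, 1])
def Spec_get_pressure_regions (pressures : List Int) (regions : List Int) (out : List (Int × List Int)) : Prop := out = get_pressure_regions_alt pressures regions
instance (pressures : List Int) (regions : List Int) (out : List (Int × List Int)) : Decidable (Spec_get_pressure_regions pressures regions out) := by unfold Spec_get_pressure_regions; infer_instance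

-- ===== CLAIM (what is proved, stated in full; the proofs are below) =====
def Claim_equal_get_pressure_regions : Prop := ∀ (pressures : List Int) (regions : List Int), Dom_get_pressure_regions pressures regions → Pre_get_pressure_regions pressures regions → Spec_get_pressure_regions pressures regions (get_pressure_regions pressures regions)

-- ===== LEMMAS AND PROOFS =====

-- B's first pass, with a generalized accumulator
def pvLabels (acc : List Int) (rs : List Int) : List Int :=
  rs.foldl (fun (acc : List Int) (r : Int) => if r > 0 ∧ ¬ r ∈ acc then acc ++ [r] else acc) acc

theorem mem_pvLabels (acc rs : List Int) (x : Int) :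
    x ∈ pvLabels acc rs ↔ x ∈ acc ∨ (x > 0 ∧ x ∈ rs) := by
  induction rs generalizing acc with
  | nil => simp [pvLabels]
  | cons r rs ih =>
    simp only [pvLabels, List.foldl_cons] at *
    rw [ih]
    by_cases h : r > 0 ∧ ¬ r ∈ acc <;> simp [h, List.mem_cons] <;> constructor <;> rintro (h'|h') <;> aesop

theorem nodup_pvLabels (acc rs : List Int) (h : acc.Nodup) : (pvLabels acc rs).Nodup := by
  induction rs generalizing acc with
  | nil => simpa [pvLabels]
  | cons r rs ih =>
    simp only [pvLabels, List.foldl_cons]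
    by_cases hr : r > 0 ∧ ¬ r ∈ acc
    · simp only [if_pos hr]; exact ih _ (by simp [List.nodup_append, h]; intro a ha he; subst he; exact hr.2 ha)
    · simp only [if_neg hr]; exact ih _ h

-- values gathered by B's comprehension for one label
def pvVals (pressures : List Int) (z : List (Int × Int)) (lab : Int) : List Int :=
  z.filterMap (fun p => if p.2 = lab then some (PySem.List.pyGetD pressures p.1 0) else none)

theorem pvVals_append (pressures : List Int) (z : List (Int × Int)) (q : Int × Int) (lab : Int) :
    pvVals pressures (z ++ [q]) lab
      = pvVals pressures z lab ++ (if q.2 = lab then [PySem.List.pyGetD pressures q.1 0] else []) := by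
  simp only [pvVals, List.filterMap_append]
  congr 1
  split_ifs with h <;> simp [h]

theorem pvVals_ne_nil (pressures : List Int) (z : List (Int × Int)) (lab : Int)
    (h : lab ∈ z.map (·.2)) : pvVals pressures z lab ≠ [] := by
  obtain ⟨p, hp, hlab⟩ := List.mem_map.mp h
  have : PySem.List.pyGetD pressures p.1 0 ∈ pvVals pressures z lab :=
    List.mem_filterMap.mpr ⟨p, hp, by simp [hlab]⟩
  intro hnil; rw [hnil] at this; exact (List.not_mem_nil) this

theorem pvVals_nil_of_not_mem (pressures : List Int) (z : List (Int × Int)) (lab : Int)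
    (h : ¬ lab ∈ z.map (·.2)) : pvVals pressures z lab = [] := by
  refine List.filterMap_eq_nil_iff.mpr ?_
  intro p hp
  have : p.2 ≠ lab := fun he => h (List.mem_map.mpr ⟨p, hp, he⟩)
  simp [this]

-- the main invariant: A's dict after the whole fold is the first-occurrence label list
-- paired with each label's gathered values, for an arbitrary index/region list z
theorem foldA_eq (pressures : List Int) (z : List (Int × Int)) :
    z.foldl (fun (d : PySem.Dict Int (List Int)) (p : Int × Int) =>
      if p.2 > 0 then
        match PySem.Dict.get? d p.2 with
        | some l => if l ≠ [] then PySem.Dict.insert d p.2 (l ++ [PySem.List.pyGetD pressures p.1 0]) else d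
        | none => PySem.Dict.insert d p.2 [PySem.List.pyGetD pressures p.1 0]
      else d) PySem.Dict.empty
    = PySem.Dict.mk ((pvLabels [] (z.map (·.2))).map (fun lab => (lab, pvVals pressures z lab))) := by
  induction z using List.reverseRecOn with
  | nil => rfl
  | append_singleton z q ih =>
    rw [List.foldl_append, ih]
    set rs := z.map (fun p => p.2) with hrs
    set labels := pvLabels [] rs with hlabels
    have hmapz : (z ++ [q]).map (fun p => p.2) = rs ++ [q.2] := by simp [hrs]
    have hL : pvLabels [] (rs ++ [q.2])
        = if q.2 > 0 ∧ ¬ q.2 ∈ labels then labels ++ [q.2] else labels := by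
      simp [pvLabels, List.foldl_append, hlabels]
    have hkeys : (PySem.Dict.mk (labels.map (fun lab => (lab, pvVals pressures z lab)))).keys
        = labels := by
      simp [PySem.Dict.keys_mk, List.map_map, Function.comp_def]
    have hnd : (PySem.Dict.mk (labels.map (fun lab => (lab, pvVals pressures z lab)))).keys.Nodup := by
      rw [hkeys]; exact nodup_pvLabels [] rs (by simp)
    rw [hmapz, hL]
    by_cases hq : q.2 > 0
    · by_cases hmem : q.2 ∈ labels
      · -- existing key: truthy branch, update in place
        have hget : (PySem.Dict.mk (labels.map (fun lab => (lab, pvVals pressures z lab)))).get? q.2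
            = some (pvVals pressures z q.2) :=
          PySem.Dict.get?_of_mem_items _ (List.mem_map.mpr ⟨q.2, hmem, rfl⟩) hnd
        have hin : q.2 ∈ rs := ((mem_pvLabels [] rs q.2).mp hmem).elim (by simp) And.right
        have hne : pvVals pressures z q.2 ≠ [] := pvVals_ne_nil pressures z q.2 hin
        have hcont : (PySem.Dict.mk (labels.map (fun lab => (lab, pvVals pressures z lab)))).contains q.2 = true :=
          (PySem.Dict.contains_iff_mem_keys _ _).mpr (by rw [hkeys]; exact hmem)
        simp only [List.foldl_cons, List.foldl_nil, if_pos hq, hget, if_pos hne, if_neg (by simp [hmem] : ¬ (q.2 > 0 ∧ ¬ q.2 ∈ labels))]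
        apply PySem.Dict.ext
        rw [PySem.Dict.items_insert_of_contains _ _ hcont]
        show (labels.map (fun lab => (lab, pvVals pressures z lab))).map _ = _
        rw [List.map_map]
        refine List.map_congr_left ?_
        intro lab hlab
        by_cases he : lab = q.2
        · subst he; simp [pvVals_append]
        · have : ¬ q.2 = lab := fun h' => he h'.symm
          simp [pvVals_append, he, this]
      · -- new key: KeyError branch, append entry
        have hget : (PySem.Dict.mk (labels.map (fun lab => (lab, pvVals pressures z lab)))).get? q.2
            = none := by
          rw [PySem.Dict.get?_eq_none_iff_not_mem_keys _ _, hkeys]; exact hmem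
        have hnotin : ¬ q.2 ∈ rs := fun h' =>
          hmem ((mem_pvLabels [] rs q.2).mpr (Or.inr ⟨hq, h'⟩))
        have hcont : (PySem.Dict.mk (labels.map (fun lab => (lab, pvVals pressures z lab)))).contains q.2 = false := by
          rw [← Bool.not_eq_true, PySem.Dict.contains_iff_mem_keys _ _, hkeys]; exact hmem
        simp only [List.foldl_cons, List.foldl_nil, if_pos hq, hget, if_pos (And.intro hq hmem)]
        apply PySem.Dict.ext
        rw [PySem.Dict.items_insert_of_not_contains _ _ hcont]
        show (labels.map (fun lab => (lab, pvVals pressures z lab))) ++ _ = _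
        rw [List.map_append]
        congr 1
        · refine List.map_congr_left ?_
          intro lab hlab
          have : ¬ q.2 = lab := fun h' => hmem (h' ▸ hlab)
          simp [pvVals_append, this]
        · have hz : pvVals pressures z q.2 = [] := pvVals_nil_of_not_mem pressures z q.2 hnotin
          simp [pvVals_append, hz]
    · -- region ≤ 0: nothing happens
      simp only [List.foldl_cons, List.foldl_nil, if_neg hq, if_neg (by simp [hq] : ¬ (q.2 > 0 ∧ ¬ q.2 ∈ labels))]
      apply PySem.Dict.ext
      show _ = List.map _ labels
      refine (List.map_congr_left ?_).symm
      intro lab hlab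
      have hpos : lab > 0 := ((mem_pvLabels [] rs lab).mp hlab).elim (by simp) And.left
      have : ¬ q.2 = lab := fun h' => hq (h' ▸ hpos)
      simp [pvVals_append, this]

theorem foldA_items (pressures regions : List Int) :
    get_pressure_regions pressures regions = get_pressure_regions_alt pressures regions := by
  unfold get_pressure_regions
  have hz : (PySem.List.enumerate regions 0).map (·.2) = regions :=
    PySem.List.map_snd_enumerate regions 0
  -- rewrite the enumerate list in A's fold via the generic lemma, then read off items of a mk
  have := foldA_eq pressures (PySem.List.enumerate regions 0)
  rw [this, hz]
  -- items of a literal dict is its list; B is literally that list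
  rfl

-- ===== VERDICT (by name: the statement is the Claim_ definition above) =====
theorem get_pressure_regions_spec : Claim_equal_get_pressure_regions := by
  intro pressures regions _ _
  exact foldA_items pressures regions
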